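-- pv_equiv track=rewrite | github.com/JunHua35/University-Algorithms | boyer-moore/BM.py | MatchedPrefix
-- ===== SOURCE A (Python) =====
-- def zalgo(patt):
--     """
--     Z-algorithm
--     """
--     pattlength = len(patt)
--     z_array = [None] * pattlength
--     z_array[0] = pattlength
--     i = 1
--     r, l = 0 , 0
--     while i < pattlength:
--         remaining = r-i+1
--         k = i-l
--
--         if i> r:
--             x = 0
--             pointer = i
--             if patt[x] == patt[i]:
--                 while pointer < pattlength and patt[x] == patt[pointer]:
--                     l = i
--                     x += 1
--                     pointer += 1
--                 z_array[i] = x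
--
--             elif patt[i] != patt[x]:
--                 z_array[i] = 0
--
--         else:
--             if z_array[k] < remaining:
--                 z_array[i] = z_array[k]
--
--             elif z_array[k] > remaining:
--                 z_array[i] = remaining
--
--             elif z_array[k] == remaining:
--                 x = remaining
--                 while pointer < pattlength and  patt[x] == patt[pointer]:
--                     l = i
--                     x += 1
--                     pointer += 1
--                 z_array[i] = x
--
--         i+=1
--
--     return z_array
--
-- def MatchedPrefix(pattern):
--     """
--     Borrowed this from my previous assignment in 2022 Sem 1
--     Coded this function referring to Ian's tutorials
--     """
--     MP_array = zalgo(pattern)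
--     counter = 0
--     #Find the index of the pattern where there are matching characters
--     for i in range(len(MP_array) - 1, -1, -1):
--         if MP_array[i] > counter and MP_array[i] + 1 == len(pattern) :
--                 counter = MP_array[i]
--         MP_array[i] = counter
--
--     return MP_array
-- ===== SOURCE B (Python) =====
-- def MatchedPrefix(pattern):
--     n = len(pattern)
--     if n == 0:
--         return []
--     # linear Z-algorithm with an [l, r) match window
--     z = [0] * n
--     z[0] = n
--     l = r = 0
--     for i in range(1, n):
--         if i < r:
--             z[i] = min(r - i, z[i - l])
--         while i + z[i] < n and pattern[z[i]] == pattern[i + z[i]]: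
--             z[i] += 1
--         if i + z[i] > r:
--             l, r = i, i + z[i]
--     # backward matched-prefix pass (same logic as the original)
--     counter = 0
--     for i in range(n - 1, -1, -1):
--         if z[i] > counter and z[i] + 1 == n:
--             counter = z[i]
--         z[i] = counter
--     return z
-- ===== Notes on version B (the rewrite author's own statement) =====
-- stated objective: faster
-- what changed: Replaced the naive per-suffix character rescans (A's i>r branch is always taken because r is never updated, so every z[i] is recomputed from scratch) with the standard linear Z-algorithm that maintains an [l,r) match window and copies/extends, keeping the original backward matched-prefix pass.
import Mathlib
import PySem

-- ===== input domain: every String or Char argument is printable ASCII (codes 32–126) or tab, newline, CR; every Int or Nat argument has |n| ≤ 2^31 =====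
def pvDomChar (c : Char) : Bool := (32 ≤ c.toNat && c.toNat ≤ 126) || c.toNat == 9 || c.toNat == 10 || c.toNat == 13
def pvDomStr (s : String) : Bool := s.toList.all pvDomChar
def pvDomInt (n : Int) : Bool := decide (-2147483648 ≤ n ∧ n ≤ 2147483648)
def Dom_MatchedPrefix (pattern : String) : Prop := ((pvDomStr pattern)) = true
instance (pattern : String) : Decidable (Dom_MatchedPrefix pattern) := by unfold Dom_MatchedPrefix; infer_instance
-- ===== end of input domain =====

-- B replaces A's quadratic per-suffix rescans (A's window bound r is never updated, so the
-- copy branch is dead) by the standard linear Z-algorithm; the backward matched-prefix pass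
-- is kept unchanged, and the equivalence of the two Z-phases is proved below.

-- ===== PORT A =====

-- A's inner `while pointer < pattlength and patt[x] == patt[pointer]` loop; the loop body
-- does `l = i; x += 1; pointer += 1`; returns the final (x, l).
-- (patt[x]/patt[pointer] are in range whenever this code runs in Python, so getD is exact.)
def pvWhileA (cs : List Char) (n i x pointer l : Nat) : Nat × Nat :=
  if h : pointer < n ∧ cs.getD x ' ' = cs.getD pointer ' ' then
    pvWhileA cs n i (x + 1) (pointer + 1) i
  else (x, l)
termination_by n - pointer
decreasing_by obtain ⟨h1, _⟩ := h; omega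

-- A's `while i < pattlength` loop of zalgo (r is never reassigned, so it is always 0 here).
def pvZalgoA (cs : List Char) (n : Nat) (i : Nat) (z : List Int) (l r : Nat) : List Int :=
  if _h : i < n then
    -- remaining = r-i+1 and k = i-l are computed in Python but only read in the dead branch
    if r < i then                        -- Python: if i > r
      if cs.getD 0 ' ' = cs.getD i ' ' then
        let p := pvWhileA cs n i 0 i l
        pvZalgoA cs n (i + 1) (z.set i (Int.ofNat p.1)) p.2 r
      else                               -- Python: elif patt[i] != patt[x]
        pvZalgoA cs n (i + 1) (z.set i 0) l r
    else
      -- unreachable on every call A makes (r stays 0 and i ≥ 1); Python would raise here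
      -- (it compares z_array[k] = None with an int, or reads the unbound name `pointer`)
      pvZalgoA cs n (i + 1) z l r
  else z
termination_by n - i

-- the backward matched-prefix pass, identical in A and in B (Source B keeps it verbatim):
-- for i from the right: if z[i] > counter and z[i]+1 == len(pattern): counter = z[i]; z[i] = counter
def pvBack (n : Int) : List Int → List Int × Int
  | [] => ([], 0)
  | a :: rest =>
    let p := pvBack n rest
    let c := if a > p.2 ∧ a + 1 = n then a else p.2
    (c :: p.1, c)

-- zalgo builds [None]*n, sets z[0] = n (IndexError on the empty pattern, excluded by Pre_),
-- runs the loop from i = 1 with l = r = 0, then MatchedPrefix runs the backward pass.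
def MatchedPrefix (pattern : String) : List Int :=
  (pvBack (Int.ofNat pattern.toList.length)
    (pvZalgoA pattern.toList pattern.toList.length 1
      ((List.replicate pattern.toList.length (0 : Int)).set 0 (Int.ofNat pattern.toList.length))
      0 0)).1

-- ===== PORT B =====

-- Source B's `while i + z[i] < n and pattern[z[i]] == pattern[i + z[i]]: z[i] += 1`
def pvExtB (cs : List Char) (n i s : Nat) : Nat :=
  if h : i + s < n ∧ cs.getD s ' ' = cs.getD (i + s) ' ' then
    pvExtB cs n i (s + 1)
  else s
termination_by n - (i + s)
decreasing_by obtain ⟨h1, _⟩ := h; omega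

-- Source B's main loop: copy min(r-i, z[i-l]) inside the window, extend, update the window
def pvZB (cs : List Char) (n : Nat) (i : Nat) (z : List Nat) (l r : Nat) : List Nat :=
  if _h : i < n then
    let s0 : Nat := if i < r then min (r - i) (z.getD (i - l) 0) else 0
    let s := pvExtB cs n i s0
    if r < i + s then                    -- Python: if i + z[i] > r
      pvZB cs n (i + 1) (z.set i s) i (i + s)
    else
      pvZB cs n (i + 1) (z.set i s) l r
  else z
termination_by n - i

def MatchedPrefix_alt (pattern : String) : List Int :=
  if pattern.toList.length = 0 then [] else
  (pvBack (Int.ofNat pattern.toList.length)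
    ((pvZB pattern.toList pattern.toList.length 1
        ((List.replicate pattern.toList.length (0 : Nat)).set 0 pattern.toList.length)
        0 0).map Int.ofNat)).1

-- ===== PRECONDITION & SPEC =====

-- Pre_ excludes only the empty pattern, on which A raises IndexError (z_array[0] = pattlength
-- on an empty list).
def Pre_MatchedPrefix (pattern : String) : Prop := pattern ≠ ""
instance (pattern : String) : Decidable (Pre_MatchedPrefix pattern) := by
  unfold Pre_MatchedPrefix; infer_instance

def pvWitness_MatchedPrefix : String := "ab"

def Spec_MatchedPrefix (pattern : String) (out : List Int) : Prop := out = MatchedPrefix_alt pattern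
instance (pattern : String) (out : List Int) : Decidable (Spec_MatchedPrefix pattern out) := by
  unfold Spec_MatchedPrefix; infer_instance

-- ===== CLAIM (what is proved, stated in full; the proofs are below) =====
def Claim_equal_MatchedPrefix : Prop := ∀ (pattern : String), Dom_MatchedPrefix pattern → Pre_MatchedPrefix pattern → Spec_MatchedPrefix pattern (MatchedPrefix pattern)

-- ===== LEMMAS AND PROOFS =====

-- length of the longest common prefix of two character lists
def pvLcp : List Char → List Char → Nat
  | a :: s, b :: t => if a = b then pvLcp s t + 1 else 0
  | _, _ => 0

lemma pvLcp_nil_right (A : List Char) : pvLcp A [] = 0 := by cases A <;> rfl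

lemma pvLcp_le_right : ∀ (A B : List Char), pvLcp A B ≤ B.length := by
  intro A
  induction A with
  | nil => intro B; cases B <;> simp [pvLcp]
  | cons a s ih =>
    intro B
    cases B with
    | nil => simp [pvLcp]
    | cons b t =>
      by_cases h : a = b
      · simpa [pvLcp, h] using ih t
      · simp [pvLcp, h]

lemma pvLcp_getD_eq : ∀ (A B : List Char) (j : Nat), j < pvLcp A B →
    A.getD j ' ' = B.getD j ' ' := by
  intro A
  induction A with
  | nil => intro B j hj; simp [pvLcp] at hj
  | cons a s ih =>
    intro B j hj
    cases B with
    | nil => simp [pvLcp_nil_right] at hj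
    | cons b t =>
      by_cases h : a = b
      · cases j with
        | zero => simpa using h
        | succ j =>
          simp only [pvLcp, if_pos h] at hj
          simpa using ih t j (by omega)
      · simp [pvLcp, h] at hj

lemma pvLcp_mismatch : ∀ (A B : List Char), pvLcp A B < A.length → pvLcp A B < B.length →
    A.getD (pvLcp A B) ' ' ≠ B.getD (pvLcp A B) ' ' := by
  intro A
  induction A with
  | nil => intro B h1 h2; simp at h1
  | cons a s ih =>
    intro B h1 h2
    cases B with
    | nil => simp at h2
    | cons b t =>
      by_cases h : a = b
      · simp only [pvLcp, if_pos h] at h1 h2 ⊢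
        simpa using ih t (by simpa using h1) (by simpa using h2)
      · simp [pvLcp, h]
lemma pvLcp_ge : ∀ (A B : List Char) (m : Nat),
    (∀ j, j < m → A.getD j ' ' = B.getD j ' ') → m ≤ A.length → m ≤ B.length →
    m ≤ pvLcp A B := by
  intro A
  induction A with
  | nil =>
    intro B m _ h1 _
    have hm : m = 0 := by simpa using h1
    subst hm; exact Nat.zero_le _
  | cons a s ih =>
    intro B m hch h1 h2
    cases B with
    | nil => simp at h2; omega
    | cons b t =>
      cases m with
      | zero => omega
      | succ m =>
        have hab : a = b := by simpa using hch 0 (by omega)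
        have : m ≤ pvLcp s t := by
          apply ih t m
          · intro j hj; simpa using hch (j + 1) (by omega)
          · simpa using h1
          · simpa using h2
        simp only [pvLcp, if_pos hab]; omega

lemma pvLcp_self : ∀ (A : List Char), pvLcp A A = A.length := by
  intro A; induction A with
  | nil => rfl
  | cons a s ih => simp [pvLcp, ih]

-- pvL cs i = length of the longest common prefix of cs and cs.drop i  (the Z-value at i)
def pvL (cs : List Char) (i : Nat) : Nat := pvLcp cs (cs.drop i)

lemma getD_drop (cs : List Char) (i j : Nat) :
    (cs.drop i).getD j ' ' = cs.getD (i + j) ' ' := by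
  simp [List.getD_eq_getElem?_getD, List.getElem?_drop]

lemma drop_eq_getD_cons (cs : List Char) (x : Nat) (h : x < cs.length) :
    cs.drop x = cs.getD x ' ' :: cs.drop (x + 1) := by
  rw [List.getD_eq_getElem cs ' ' h]
  exact List.drop_eq_getElem_cons h

lemma pvL_le (cs : List Char) (i : Nat) : pvL cs i ≤ cs.length - i := by
  simpa using pvLcp_le_right cs (cs.drop i)

lemma pvL_zero (cs : List Char) : pvL cs 0 = cs.length := by
  simp [pvL, pvLcp_self]

lemma pvL_char (cs : List Char) (i j : Nat) (h : j < pvL cs i) :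
    cs.getD j ' ' = cs.getD (i + j) ' ' := by
  have := pvLcp_getD_eq cs (cs.drop i) j h
  rwa [getD_drop] at this

lemma pvL_mismatch (cs : List Char) (i : Nat) (h : pvL cs i < cs.length - i) :
    cs.getD (pvL cs i) ' ' ≠ cs.getD (i + pvL cs i) ' ' := by
  have h1 : pvL cs i < cs.length := lt_of_lt_of_le h (Nat.sub_le _ _)
  have := pvLcp_mismatch cs (cs.drop i) h1 (by simpa using h)
  rwa [getD_drop] at this

lemma pvL_ge (cs : List Char) (i m : Nat)
    (hch : ∀ j, j < m → cs.getD j ' ' = cs.getD (i + j) ' ')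
    (hm : m ≤ cs.length - i) : m ≤ pvL cs i := by
  apply pvLcp_ge
  · intro j hj; rw [getD_drop]; exact hch j hj
  · exact le_trans hm (Nat.sub_le _ _)
  · simpa using hm

lemma pvL_eq (cs : List Char) (i m : Nat)
    (hch : ∀ j, j < m → cs.getD j ' ' = cs.getD (i + j) ' ')
    (hm : m ≤ cs.length - i)
    (hmm : cs.getD m ' ' ≠ cs.getD (i + m) ' ') : pvL cs i = m := by
  have hge := pvL_ge cs i m hch hm
  have hle : pvL cs i ≤ m := by
    by_contra h
    exact hmm (pvL_char cs i m (by omega))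
  omega

lemma pvL_eq_zero_of_head_ne (cs : List Char) (i : Nat) (hi : i < cs.length)
    (hne : ¬ cs.getD 0 ' ' = cs.getD i ' ') : pvL cs i = 0 := by
  cases cs with
  | nil => simp at hi
  | cons a t =>
    unfold pvL
    rw [drop_eq_getD_cons (a :: t) i hi]
    simp only [pvLcp]
    rw [if_neg (by simpa [List.getD] using hne)]

-- window-copy lemmas: if cs[l:r] matches the prefix (r - l ≤ pvL cs l) and l < i < r ≤ n,
-- the Z-value at i is determined by the one at i - l
lemma pvL_copy_lt (cs : List Char) (l i r : Nat) (hli : l < i) (hir : i < r)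
    (hrn : r ≤ cs.length) (hwin : r - l ≤ pvL cs l)
    (hk : pvL cs (i - l) < r - i) : pvL cs i = pvL cs (i - l) := by
  have hwchar : ∀ j, j < r - l → cs.getD j ' ' = cs.getD (l + j) ' ' :=
    fun j hj => pvL_char cs l j (lt_of_lt_of_le hj hwin)
  apply pvL_eq
  · intro j hj
    have h1 : cs.getD j ' ' = cs.getD ((i - l) + j) ' ' := pvL_char cs (i - l) j hj
    have h2 : cs.getD ((i - l) + j) ' ' = cs.getD (l + ((i - l) + j)) ' ' :=
      hwchar ((i - l) + j) (by omega)
    rw [h1, h2]; congr 1; omega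
  · omega
  · have hmq : cs.getD (pvL cs (i - l)) ' ' ≠ cs.getD ((i - l) + pvL cs (i - l)) ' ' :=
      pvL_mismatch cs (i - l) (by omega)
    have h2 : cs.getD ((i - l) + pvL cs (i - l)) ' ' = cs.getD (i + pvL cs (i - l)) ' ' := by
      have := hwchar ((i - l) + pvL cs (i - l)) (by omega)
      rw [this]; congr 1; omega
    rw [← h2]; exact hmq

lemma pvL_copy_ge (cs : List Char) (l i r : Nat) (hli : l < i) (hir : i < r)
    (hrn : r ≤ cs.length) (hwin : r - l ≤ pvL cs l)
    (hk : r - i ≤ pvL cs (i - l)) : r - i ≤ pvL cs i := by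
  apply pvL_ge
  · intro j hj
    have h1 : cs.getD j ' ' = cs.getD ((i - l) + j) ' ' := pvL_char cs (i - l) j (by omega)
    have h2 : cs.getD ((i - l) + j) ' ' = cs.getD (l + ((i - l) + j)) ' ' :=
      pvL_char cs l ((i - l) + j) (by
        apply lt_of_lt_of_le _ hwin; omega)
    rw [h1, h2]; congr 1; omega
  · omega

-- B's extension loop computes exactly the Z-value when started at s ≤ pvL cs i
lemma pvExtB_spec (cs : List Char) (i : Nat) (hi : 1 ≤ i) :
    ∀ d s, s ≤ pvL cs i → pvL cs i - s ≤ d → pvExtB cs cs.length i s = pvL cs i := by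
  intro d
  induction d with
  | zero =>
    intro s hs hd
    have hseq : s = pvL cs i := by omega
    rw [pvExtB, dif_neg]
    · exact hseq
    · rintro ⟨h1, h2⟩
      have hlt : pvL cs i < cs.length - i := by omega
      exact pvL_mismatch cs i hlt (by rw [← hseq]; exact h2)
  | succ d ih =>
    intro s hs hd
    by_cases hslt : s < pvL cs i
    · have hle : pvL cs i ≤ cs.length - i := pvL_le cs i
      rw [pvExtB, dif_pos ⟨by omega, pvL_char cs i s hslt⟩]
      exact ih (s + 1) (by omega) (by omega)
    · have hseq : s = pvL cs i := by omega
      rw [pvExtB, dif_neg]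
      · exact hseq
      · rintro ⟨h1, h2⟩
        have hlt : pvL cs i < cs.length - i := by omega
        exact pvL_mismatch cs i hlt (by rw [← hseq]; exact h2)

-- A's while loop from (x, pointer = i + x) returns x plus the common extension length
lemma pvWhileA_spec (cs : List Char) (i : Nat) (hi : 1 ≤ i) :
    ∀ d x l, cs.length - (i + x) ≤ d →
      (pvWhileA cs cs.length i x (i + x) l).1 =
        x + pvLcp (cs.drop x) (cs.drop (i + x)) := by
  intro d
  induction d with
  | zero =>
    intro x l hd
    rw [pvWhileA, dif_neg (by rintro ⟨h1, _⟩; omega)]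
    rw [show cs.drop (i + x) = [] from List.drop_eq_nil_of_le (by omega), pvLcp_nil_right]
    simp
  | succ d ih =>
    intro x l hd
    by_cases hc : i + x < cs.length ∧ cs.getD x ' ' = cs.getD (i + x) ' '
    · obtain ⟨h1, h2⟩ := hc
      have hx : x < cs.length := by omega
      rw [pvWhileA, dif_pos ⟨h1, h2⟩]
      have heq : i + x + 1 = i + (x + 1) := by omega
      rw [heq, ih (x + 1) i (by omega)]
      rw [drop_eq_getD_cons cs x hx, drop_eq_getD_cons cs (i + x) h1]
      simp only [pvLcp, if_pos h2]
      have : i + x + 1 = i + (x + 1) := by omega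
      rw [this]; omega
    · rw [pvWhileA, dif_neg hc]
      by_cases h1 : i + x < cs.length
      · have hx : x < cs.length := by omega
        have h2 : cs.getD x ' ' ≠ cs.getD (i + x) ' ' := fun h => hc ⟨h1, h⟩
        rw [drop_eq_getD_cons cs x hx, drop_eq_getD_cons cs (i + x) h1]
        simp only [pvLcp, if_neg h2]
        simp
      · rw [show cs.drop (i + x) = [] from List.drop_eq_nil_of_le (by omega), pvLcp_nil_right]
        simp

lemma getD_set_self {α : Type} (z : List α) (i : Nat) (v d : α) (h : i < z.length) :
    (z.set i v).getD i d = v := by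
  simp [List.getD_eq_getElem?_getD, List.getElem?_set, h]

lemma getD_set_ne {α : Type} (z : List α) (i j : Nat) (v d : α) (h : i ≠ j) :
    (z.set i v).getD j d = z.getD j d := by
  simp [List.getD_eq_getElem?_getD, List.getElem?_set_ne h]

-- A's main loop fills positions i..n-1 with the Z-values
lemma pvZalgoA_spec (cs : List Char) :
    ∀ d i z l, cs.length - i ≤ d → 1 ≤ i → z.length = cs.length →
      (pvZalgoA cs cs.length i z l 0).length = cs.length ∧
      ∀ j, (pvZalgoA cs cs.length i z l 0).getD j 0 =
        if i ≤ j ∧ j < cs.length then Int.ofNat (pvL cs j) else z.getD j 0 := by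
  intro d
  induction d with
  | zero =>
    intro i z l hd hi hz
    rw [pvZalgoA, dif_neg (by omega)]
    refine ⟨hz, fun j => ?_⟩
    rw [if_neg (by omega)]
  | succ d ih =>
    intro i z l hd hi hz
    by_cases hin : i < cs.length
    · have hset : ∀ (l' : Nat),
          (pvZalgoA cs cs.length (i + 1) (z.set i (Int.ofNat (pvL cs i))) l' 0).length = cs.length ∧
          ∀ j, (pvZalgoA cs cs.length (i + 1) (z.set i (Int.ofNat (pvL cs i))) l' 0).getD j 0 =
            if i ≤ j ∧ j < cs.length then Int.ofNat (pvL cs j) else z.getD j 0 := by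
        intro l'
        obtain ⟨hl1, hl2⟩ := ih (i + 1) (z.set i (Int.ofNat (pvL cs i))) l' (by omega) (by omega)
          (by simpa using hz)
        refine ⟨hl1, fun j => ?_⟩
        rw [hl2 j]
        by_cases hj1 : i + 1 ≤ j ∧ j < cs.length
        · rw [if_pos hj1, if_pos (by omega)]
        · rw [if_neg hj1]
          by_cases hji : j = i
          · subst hji
            rw [getD_set_self z j _ 0 (by omega), if_pos (by omega)]
          · rw [getD_set_ne z i j _ 0 (fun h => hji h.symm)]
            rw [if_neg (by omega)]
      rw [pvZalgoA, dif_pos hin, if_pos (by omega : (0:Nat) < i)]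
      by_cases hch : cs.getD 0 ' ' = cs.getD i ' '
      · rw [if_pos hch]
        have hw : (pvWhileA cs cs.length i 0 i l).1 = pvL cs i := by
          have := pvWhileA_spec cs i hi (cs.length) 0 l (by omega)
          simpa [pvL] using this
        have : (pvWhileA cs cs.length i 0 i l).1 = pvL cs i := hw
        simp only [this]
        exact hset _
      · rw [if_neg hch]
        have hL0 : pvL cs i = 0 := pvL_eq_zero_of_head_ne cs i hin hch
        rw [show z.set i 0 = z.set i (Int.ofNat (pvL cs i)) by rw [hL0]; rfl]
        exact hset _
    · rw [pvZalgoA, dif_neg hin]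
      refine ⟨hz, fun j => ?_⟩
      rw [if_neg (by omega)]

-- B's main loop fills positions i..n-1 with the Z-values, under the window invariant
lemma pvZB_spec (cs : List Char) :
    ∀ d i z l r, cs.length - i ≤ d → 1 ≤ i → z.length = cs.length →
      (∀ j, j < i → z.getD j 0 = pvL cs j) →
      (r ≤ i ∨ (1 ≤ l ∧ l < i ∧ r ≤ cs.length ∧ r - l ≤ pvL cs l)) →
      (pvZB cs cs.length i z l r).length = cs.length ∧
      ∀ j, (pvZB cs cs.length i z l r).getD j 0 =
        if i ≤ j ∧ j < cs.length then pvL cs j else z.getD j 0 := by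
  intro d
  induction d with
  | zero =>
    intro i z l r hd hi hz hinv hwin
    rw [pvZB, dif_neg (by omega)]
    exact ⟨hz, fun j => by rw [if_neg (by omega)]⟩
  | succ d ih =>
    intro i z l r hd hi hz hinv hwin
    by_cases hin : i < cs.length
    · have hs0 : (if i < r then min (r - i) (z.getD (i - l) 0) else 0) ≤ pvL cs i := by
        by_cases hir : i < r
        · rcases hwin with hwl | ⟨hl1, hli, hrn, hw⟩
          · omega
          · rw [if_pos hir, hinv (i - l) (by omega)]
            by_cases hk : pvL cs (i - l) < r - i
            · have := pvL_copy_lt cs l i r hli hir hrn hw hk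
              omega
            · have := pvL_copy_ge cs l i r hli hir hrn hw (by omega)
              omega
        · rw [if_neg hir]; omega
      have hs : pvExtB cs cs.length i (if i < r then min (r - i) (z.getD (i - l) 0) else 0)
          = pvL cs i :=
        pvExtB_spec cs i hi (pvL cs i) _ hs0 (by omega)
      have hnext : ∀ (l' r' : Nat),
          (r' ≤ i + 1 ∨ (1 ≤ l' ∧ l' < i + 1 ∧ r' ≤ cs.length ∧ r' - l' ≤ pvL cs l')) →
          (pvZB cs cs.length (i + 1) (z.set i (pvL cs i)) l' r').length = cs.length ∧
          ∀ j, (pvZB cs cs.length (i + 1) (z.set i (pvL cs i)) l' r').getD j 0 =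
            if i ≤ j ∧ j < cs.length then pvL cs j else z.getD j 0 := by
        intro l' r' hwin'
        obtain ⟨hl1, hl2⟩ := ih (i + 1) (z.set i (pvL cs i)) l' r' (by omega) (by omega)
          (by simpa using hz)
          (by
            intro j hj
            by_cases hji : j = i
            · subst hji; exact getD_set_self z j _ 0 (by omega)
            · rw [getD_set_ne z i j _ 0 (fun h => hji h.symm)]
              exact hinv j (by omega))
          hwin'
        refine ⟨hl1, fun j => ?_⟩
        rw [hl2 j]
        by_cases hj1 : i + 1 ≤ j ∧ j < cs.length
        · rw [if_pos hj1, if_pos (by omega)]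
        · rw [if_neg hj1]
          by_cases hji : j = i
          · subst hji
            rw [getD_set_self z j _ 0 (by omega), if_pos (by omega)]
          · rw [getD_set_ne z i j _ 0 (fun h => hji h.symm), if_neg (by omega)]
      rw [pvZB, dif_pos hin]
      simp only [hs]
      have hLle : pvL cs i ≤ cs.length - i := pvL_le cs i
      by_cases hr : r < i + pvL cs i
      · rw [if_pos hr]
        exact hnext i (i + pvL cs i) (by right; refine ⟨by omega, by omega, by omega, by omega⟩)
      · rw [if_neg hr]
        apply hnext l r
        rcases hwin with hwl | ⟨hl1, hli, hrn, hw⟩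
        · left; omega
        · right; exact ⟨hl1, by omega, hrn, hw⟩
    · rw [pvZB, dif_neg hin]
      exact ⟨hz, fun j => by rw [if_neg (by omega)]⟩

-- the two Z-phases produce the same list on a non-empty pattern
lemma zPhase_eq (cs : List Char) (h : cs ≠ []) :
    pvZalgoA cs cs.length 1
      ((List.replicate cs.length (0 : Int)).set 0 (Int.ofNat cs.length)) 0 0
    = (pvZB cs cs.length 1
        ((List.replicate cs.length (0 : Nat)).set 0 cs.length) 0 0).map Int.ofNat := by
  have hn : 0 < cs.length := List.length_pos_iff.mpr h
  obtain ⟨ha1, ha2⟩ := pvZalgoA_spec cs cs.length 1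
    ((List.replicate cs.length (0 : Int)).set 0 (Int.ofNat cs.length)) 0
    (by omega) (by omega) (by simp)
  obtain ⟨hb1, hb2⟩ := pvZB_spec cs cs.length 1
    ((List.replicate cs.length (0 : Nat)).set 0 cs.length) 0 0 (by omega) (by omega) (by simp)
    (by
      intro j hj
      have hj0 : j = 0 := by omega
      subst hj0
      rw [getD_set_self _ 0 _ 0 (by simpa using hn), pvL_zero])
    (by left; omega)
  apply List.ext_getElem (by rw [List.length_map, hb1]; exact ha1)
  intro j hj hj'
  have hjn : j < cs.length := by rwa [ha1] at hj
  rw [← List.getD_eq_getElem _ 0 hj]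
  have hjb : j < (pvZB cs cs.length 1 ((List.replicate cs.length (0 : Nat)).set 0 cs.length) 0 0).length := by
    rw [hb1]; exact hjn
  rw [List.getElem_map, ← List.getD_eq_getElem _ 0 hjb]
  rw [ha2 j, hb2 j]
  by_cases hj1 : 1 ≤ j
  · rw [if_pos ⟨hj1, hjn⟩, if_pos ⟨hj1, hjn⟩]
  · have hj0 : j = 0 := by omega
    subst hj0
    rw [if_neg (by omega), if_neg (by omega)]
    rw [getD_set_self _ 0 _ 0 (by simpa using hn), getD_set_self _ 0 _ 0 (by simpa using hn)]

-- ===== VERDICT (by name: the statement is the Claim_ definition above) =====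
theorem MatchedPrefix_spec : Claim_equal_MatchedPrefix := by
  intro pattern _hdom hpre
  unfold Spec_MatchedPrefix MatchedPrefix MatchedPrefix_alt
  have hne : pattern.toList ≠ [] := fun h => hpre (String.toList_eq_nil_iff.mp h)
  have hn : pattern.toList.length ≠ 0 := by
    simpa using fun h => hne (List.length_eq_zero_iff.mp h)
  rw [if_neg hn, zPhase_eq pattern.toList hne]
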